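-- pv_equiv track=rewrite | github.com/silent-dxx/stackview | python/gdbmi_utils.py | search_mapping
-- ===== SOURCE A (Python) =====
-- def search_mapping(mapping, fullname):
--     match_list = []
--     for mapitem in mapping:
--         if (fullname.startswith(mapitem)):
--             match_list.append(mapitem)
--
--     max_len = 0
--     matched = None
--     for m in match_list:
--         l = len(m)
--         if l > max_len:
--             max_len = l
--             matched = m
--
--     if matched:
--         convert_filename = mapping[matched] + fullname[max_len:]
--         return convert_filename
--     else:
--         return fullname
-- ===== SOURCE B (Python) =====
-- def search_mapping(mapping, fullname):
--     # Longest-prefix rewrite: probe only the key lengths that occur in the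
--     # mapping, longest first, with a direct dict lookup per candidate prefix.
--     for i in sorted({len(k) for k in mapping}, reverse=True):
--         if 0 < i <= len(fullname) and fullname[:i] in mapping:
--             return mapping[fullname[:i]] + fullname[i:]
--     return fullname
-- ===== Notes on version B (the rewrite author's own statement) =====
-- stated objective: alternative
-- what changed: Instead of collecting every matching key and rescanning the matches for the longest, B sorts the distinct key lengths descending and probes each candidate prefix of fullname with a direct dict lookup, returning on the first hit.
import Mathlib
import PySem

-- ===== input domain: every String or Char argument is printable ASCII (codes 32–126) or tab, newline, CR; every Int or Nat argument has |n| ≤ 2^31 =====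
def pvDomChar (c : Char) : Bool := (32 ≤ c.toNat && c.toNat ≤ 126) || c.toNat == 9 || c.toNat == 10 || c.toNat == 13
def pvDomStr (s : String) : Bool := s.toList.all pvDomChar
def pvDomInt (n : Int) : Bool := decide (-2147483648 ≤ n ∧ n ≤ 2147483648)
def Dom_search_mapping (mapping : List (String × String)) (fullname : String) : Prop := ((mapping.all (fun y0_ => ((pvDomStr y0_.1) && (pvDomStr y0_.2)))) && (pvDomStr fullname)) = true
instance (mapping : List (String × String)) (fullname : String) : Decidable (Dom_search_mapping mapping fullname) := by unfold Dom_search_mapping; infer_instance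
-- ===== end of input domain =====

-- B replaces A's scan over every mapping key (collect all matches, then a second
-- pass for the longest) by enumerating prefixes of fullname from longest to
-- shortest (only key lengths present in the mapping) with a direct dict lookup
-- per candidate; equal outputs, a different traversal.

-- ===== PORT A =====
def search_mapping (mapping : List (String × String)) (fullname : String) : String :=
  let d := PySem.Dict.ofList mapping
  let match_list := (PySem.Dict.keys d).foldl
      (fun acc k => if PySem.Str.startswith fullname k then acc ++ [k] else acc) []
  let r := match_list.foldl
      (fun (p : Int × Option String) m =>
        if p.1 < (PySem.Str.len m : Int) then ((PySem.Str.len m : Int), some m) else p)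
      ((0 : Int), (none : Option String))
  match r.2 with
  | some m =>
      -- `if matched:` — matched is None or a string; "" is falsy
      if m = "" then fullname
      else ((PySem.Dict.get? d m).getD "") ++
        String.ofList (PySem.List.slice fullname.toList (some r.1) none)
  | none => fullname

-- ===== PORT B =====
def smGo (d : PySem.Dict String String) (fullname : String) : List Int → String
  | [] => fullname
  | i :: is =>
      if 0 < i ∧ i ≤ PySem.Str.len fullname then
        if PySem.Dict.contains d (String.ofList (PySem.List.slice fullname.toList none (some i))) then
          (PySem.Dict.get? d (String.ofList (PySem.List.slice fullname.toList none (some i)))).getD ""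
            ++ String.ofList (PySem.List.slice fullname.toList (some i) none)
        else smGo d fullname is
      else smGo d fullname is

def search_mapping_alt (mapping : List (String × String)) (fullname : String) : String :=
  let d := PySem.Dict.ofList mapping
  smGo d fullname
    (PySem.List.sorted (PySem.Set.ofList ((PySem.Dict.keys d).map (fun k => PySem.Str.len k)))
      (fun x => x) true)

-- ===== PRECONDITION & SPEC =====
def Spec_search_mapping (mapping : List (String × String)) (fullname : String) (out : String) : Prop := out = search_mapping_alt mapping fullname
instance (mapping : List (String × String)) (fullname : String) (out : String) : Decidable (Spec_search_mapping mapping fullname out) := by unfold Spec_search_mapping; infer_instance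

-- ===== CLAIM (what is proved, stated in full; the proofs are below) =====
def Claim_equal_search_mapping : Prop := ∀ (mapping : List (String × String)) (fullname : String), Dom_search_mapping mapping fullname → Spec_search_mapping mapping fullname (search_mapping mapping fullname)

-- ===== LEMMAS AND PROOFS =====

-- Invariant of A's second loop (first strict maximum by length).
theorem fold_max_inv (xs : List String) : ∀ (b : Int) (mo : Option String), 0 ≤ b →
    b ≤ (xs.foldl (fun (p : Int × Option String) m =>
        if p.1 < PySem.Str.len m then (PySem.Str.len m, some m) else p) (b, mo)).1 ∧
    (∀ x ∈ xs, PySem.Str.len x ≤ (xs.foldl (fun (p : Int × Option String) m =>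
        if p.1 < PySem.Str.len m then (PySem.Str.len m, some m) else p) (b, mo)).1) ∧
    (xs.foldl (fun (p : Int × Option String) m =>
        if p.1 < PySem.Str.len m then (PySem.Str.len m, some m) else p) (b, mo) = (b, mo) ∨
      ∃ m ∈ xs, xs.foldl (fun (p : Int × Option String) m =>
        if p.1 < PySem.Str.len m then (PySem.Str.len m, some m) else p) (b, mo)
          = (PySem.Str.len m, some m) ∧ b < PySem.Str.len m) := by
  induction xs with
  | nil => intro b mo hb; simp
  | cons x xs ih =>
    intro b mo hb
    by_cases h : b < PySem.Str.len x
    · simp only [List.foldl_cons, if_pos h]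
      obtain ⟨h1, h2, h3⟩ := ih (PySem.Str.len x) (some x) (by omega)
      refine ⟨le_trans (le_of_lt h) h1, ?_, ?_⟩
      · intro y hy
        rcases List.mem_cons.mp hy with rfl | hy
        · exact h1
        · exact h2 y hy
      · rcases h3 with h3 | ⟨m, hm, hEq, hlt⟩
        · exact Or.inr ⟨x, List.mem_cons_self .., by rw [h3], h⟩
        · exact Or.inr ⟨m, List.mem_cons_of_mem _ hm, hEq, lt_trans h hlt⟩
    · simp only [List.foldl_cons, if_neg h]
      obtain ⟨h1, h2, h3⟩ := ih b mo hb
      refine ⟨h1, ?_, ?_⟩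
      · intro y hy
        rcases List.mem_cons.mp hy with rfl | hy
        · exact le_trans (not_lt.mp h) h1
        · exact h2 y hy
      · rcases h3 with h3 | ⟨m, hm, hEq, hlt⟩
        · exact Or.inl h3
        · exact Or.inr ⟨m, List.mem_cons_of_mem _ hm, hEq, hlt⟩

theorem smGo_append (d : PySem.Dict String String) (fullname : String) (is₁ is₂ : List Int)
    (h : ∀ i ∈ is₁, 0 < i → i ≤ PySem.Str.len fullname → PySem.Dict.contains d
        (String.ofList (PySem.List.slice fullname.toList none (some i))) = false) :
    smGo d fullname (is₁ ++ is₂) = smGo d fullname is₂ := by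
  induction is₁ with
  | nil => simp
  | cons i is ih =>
    simp only [List.cons_append, smGo]
    by_cases hg : 0 < i ∧ i ≤ PySem.Str.len fullname
    · rw [if_pos hg, h i (List.mem_cons_self ..) hg.1 hg.2]
      simp only [Bool.false_eq_true, if_false]
      exact ih (fun j hj => h j (List.mem_cons_of_mem _ hj))
    · rw [if_neg hg]
      exact ih (fun j hj => h j (List.mem_cons_of_mem _ hj))

theorem smGo_nil_eq (d : PySem.Dict String String) (fullname : String) :
    smGo d fullname [] = fullname := rfl

theorem smGo_cons_found (d : PySem.Dict String String) (fullname : String) (i : Int) (is : List Int)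
    (h0 : 0 < i) (hn : i ≤ PySem.Str.len fullname)
    (hc : PySem.Dict.contains d
        (String.ofList (PySem.List.slice fullname.toList none (some i))) = true) :
    smGo d fullname (i :: is) =
      (PySem.Dict.get? d (String.ofList (PySem.List.slice fullname.toList none (some i)))).getD ""
        ++ String.ofList (PySem.List.slice fullname.toList (some i) none) := by
  simp only [smGo]
  rw [if_pos ⟨h0, hn⟩, if_pos hc]

-- A prefix of fullname found in the dict lands in A's match list, with the expected length.
theorem mem_ML_of_contains (d : PySem.Dict String String) (fullname : String) (i : Int)
    (h0 : 0 < i) (hn : i ≤ (fullname.toList.length : Int))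
    (hc : PySem.Dict.contains d
      (String.ofList (PySem.List.slice fullname.toList none (some i))) = true) :
    (String.ofList (PySem.List.slice fullname.toList none (some i)))
        ∈ (PySem.Dict.keys d).filter (fun k => PySem.Str.startswith fullname k) ∧
    PySem.Str.len (String.ofList (PySem.List.slice fullname.toList none (some i))) = i := by
  rw [PySem.List.slice_to _ (le_of_lt h0)] at *
  have htl : (String.ofList (fullname.toList.take i.toNat)).toList = fullname.toList.take i.toNat := by simp
  constructor
  · rw [List.mem_filter]
    refine ⟨(PySem.Dict.contains_iff_mem_keys d _).mp hc, ?_⟩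
    simp only [PySem.Str.startswith_eq, htl]
    exact (PySem.Chars.startswith_iff _ _).mpr (List.take_prefix _ _)
  · have hl : PySem.Str.len (String.ofList (fullname.toList.take i.toNat))
        = ((min i.toNat fullname.toList.length : Nat) : Int) := by
      simp [List.length_take]
    rw [hl]; omega

theorem search_mapping_main (mapping : List (String × String)) (fullname : String) :
    search_mapping mapping fullname = search_mapping_alt mapping fullname := by
  simp only [search_mapping, search_mapping_alt]
  rw [PySem.List.foldl_append_if_eq_filter]
  simp only [List.nil_append]
  set d := PySem.Dict.ofList mapping with hd
  set ML := (PySem.Dict.keys d).filter (fun k => PySem.Str.startswith fullname k) with hML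
  set lst := PySem.List.sorted
      (PySem.Set.ofList ((PySem.Dict.keys d).map (fun k => PySem.Str.len k))) (fun x => x) true
    with hlst
  obtain ⟨-, hmax, hcase⟩ := fold_max_inv ML 0 none le_rfl
  have hlen : PySem.Str.len fullname = (fullname.toList.length : Int) := by simp
  rcases hcase with hc | ⟨m, hm, hc, hmpos⟩
  · -- no (nonempty) match: A returns fullname; B's scan falls through
    rw [hc]
    have hall : ∀ i ∈ lst, 0 < i → i ≤ PySem.Str.len fullname →
        PySem.Dict.contains d
          (String.ofList (PySem.List.slice fullname.toList none (some i))) = false := by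
      intro i _ hi0 hin
      rw [hlen] at hin
      rcases Bool.eq_false_or_eq_true (PySem.Dict.contains d
          (String.ofList (PySem.List.slice fullname.toList none (some i)))) with hcb | hcb
      · exfalso
        obtain ⟨hmem, hlenp⟩ := mem_ML_of_contains d fullname i hi0 hin hcb
        have hle := hmax _ hmem
        rw [hc] at hle
        simp only at hle
        omega
      · exact hcb
    rw [← List.append_nil lst, smGo_append d fullname _ [] hall, smGo_nil_eq]
  · -- a longest nonempty match m exists
    rw [hc]
    have hpre : m.toList <+: fullname.toList := by
      have hsw := (List.mem_filter.mp hm).2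
      simp only [PySem.Str.startswith_eq] at hsw
      exact (PySem.Chars.startswith_iff _ _).mp hsw
    have hlm : PySem.Str.len m = (m.toList.length : Int) := by simp
    have hlm_pos : 0 < m.toList.length := by omega
    have hlm_le : m.toList.length ≤ fullname.toList.length := hpre.length_le
    have hne : m ≠ "" := by
      intro h; subst h; simp at hlm_pos
    show (if m = "" then fullname
      else (PySem.Dict.get? d m).getD "" ++
        String.ofList (PySem.List.slice fullname.toList (some (PySem.Str.len m)) none)) = _
    rw [if_neg hne]
    have hpm : String.ofList (PySem.List.slice fullname.toList none
        (some (PySem.Str.len m))) = m := by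
      rw [hlm, PySem.List.slice_to _ (by omega)]
      have hmt : m.toList = fullname.toList.take m.toList.length :=
        List.prefix_iff_eq_take.mp hpre
      rw [Int.toNat_natCast, ← hmt]
      simp
    -- m's length occurs in the probed length list
    have hmemlst : PySem.Str.len m ∈ lst := by
      rw [hlst, PySem.List.mem_sorted, PySem.Set.mem_ofList]
      exact List.mem_map_of_mem ((List.mem_filter.mp hm).1)
    obtain ⟨is₁, is₂, hsplit⟩ := List.append_of_mem hmemlst
    have hnd : lst.Nodup :=
      ((PySem.List.sorted_perm ..).nodup_iff).mpr (PySem.Set.nodup_ofList _)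
    have hpw : lst.Pairwise (fun a b : Int => b ≤ a) := PySem.List.sorted_pairwise_rev ..
    have hgt : ∀ i ∈ is₁, PySem.Str.len m < i := by
      intro i hi
      have hge : PySem.Str.len m ≤ i := by
        rw [hsplit, List.pairwise_append] at hpw
        exact hpw.2.2 i hi _ (List.mem_cons_self ..)
      have hneq : i ≠ PySem.Str.len m := by
        rw [hsplit, List.nodup_append] at hnd
        intro hEq
        subst hEq
        exact hnd.2.2 _ hi _ (List.mem_cons_self ..) rfl
      omega
    have hfalse : ∀ i ∈ is₁, 0 < i → i ≤ PySem.Str.len fullname →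
        PySem.Dict.contains d
          (String.ofList (PySem.List.slice fullname.toList none (some i))) = false := by
      intro i hi hi0 hin
      rw [hlen] at hin
      rcases Bool.eq_false_or_eq_true (PySem.Dict.contains d
          (String.ofList (PySem.List.slice fullname.toList none (some i)))) with hcb | hcb
      · exfalso
        obtain ⟨hmem, hlenp⟩ := mem_ML_of_contains d fullname i hi0 hin hcb
        have hle := hmax _ hmem
        rw [hc] at hle
        simp only at hle
        have := hgt i hi
        omega
      · exact hcb
    have hctrue : PySem.Dict.contains d (String.ofList (PySem.List.slice fullname.toList none
        (some (PySem.Str.len m)))) = true := by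
      rw [hpm]
      exact (PySem.Dict.contains_iff_mem_keys d m).mpr (List.mem_filter.mp hm).1
    rw [hsplit, smGo_append d fullname _ _ hfalse,
      smGo_cons_found d fullname _ _ (by omega) (by rw [hlen]; omega) hctrue, hpm]

-- ===== VERDICT (by name: the statement is the Claim_ definition above) =====
theorem search_mapping_spec : Claim_equal_search_mapping := by
  intro mapping fullname _
  unfold Spec_search_mapping
  exact search_mapping_main mapping fullname
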